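-- pv_equiv track=rewrite | github.com/Quanta-of-solitude/12313123134federation23421raven | cogs/utils.py | get_parts
-- ===== SOURCE A (Python) =====
-- def get_parts(string):
--     '''
--     Splits the sections of the embed command
--     '''
--     for i, char in enumerate(string):
--         if char == "{":
--             ret = ""
--             while char != "}":
--                 i += 1
--                 char = string[i]
--                 ret += char
--             yield ret.rstrip('}')
-- ===== SOURCE B (Python) =====
-- def get_parts(string):
--     # One right-to-left pass precomputes, for each position, the index of the
--     # next '}' at or after it; each '{' then yields its slice directly.
--     n = len(string)
--     next_close = [None] * (n + 1)
--     for i in range(n - 1, -1, -1):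
--         next_close[i] = i if string[i] == '}' else next_close[i + 1]
--     for i, ch in enumerate(string):
--         if ch == '{':
--             j = next_close[i + 1]
--             if j is not None:
--                 yield string[i + 1:j]
-- ===== Notes on version B (the rewrite author's own statement) =====
-- stated objective: alternative
-- what changed: Replaces A's per-'{' inner rescan to the next '}' (plus rstrip) with a right-to-left precomputed next-close-index table and a direct slice per '{'; Pre_ excludes exactly the strings on which A raises IndexError (a '{' with no later '}').
import Mathlib
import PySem

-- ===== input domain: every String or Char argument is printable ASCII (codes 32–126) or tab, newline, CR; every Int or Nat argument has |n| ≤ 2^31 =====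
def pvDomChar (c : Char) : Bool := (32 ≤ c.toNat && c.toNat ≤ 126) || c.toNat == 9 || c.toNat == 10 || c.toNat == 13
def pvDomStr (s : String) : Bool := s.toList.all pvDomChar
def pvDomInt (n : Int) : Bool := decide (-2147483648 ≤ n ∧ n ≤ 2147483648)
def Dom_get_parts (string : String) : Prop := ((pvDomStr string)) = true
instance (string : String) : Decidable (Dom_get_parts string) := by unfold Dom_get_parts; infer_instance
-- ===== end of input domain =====

-- B replaces A's per-'{' inner rescan with one right-to-left next-'}' table and direct slices;
-- the proved equivalence is about the collected yields on inputs where A raises no IndexError.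

-- ===== PORT A =====
-- inner `while char != "}"` loop: walks forward from position i+1 (here: over the
-- suffix `string[i+1:]`), appending each char to ret, stopping after consuming a '}'.
-- Returns none when the walk runs off the end (Python IndexError; excluded by Pre_).
def scanA : List Char → List Char → Option (List Char)
  | [], _ => none
  | c :: rs, ret => if c = '}' then some (ret ++ [c]) else scanA rs (ret ++ [c])

-- ret.rstrip('}')
def rstripRB (l : List Char) : List Char := (l.reverse.dropWhile (· = '}')).reverse

def get_parts (string : String) : List String :=
  string.toList.zipIdx.foldl (fun acc ci =>
    if ci.1 = '{' then
      match scanA (string.toList.drop (ci.2 + 1)) [] with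
      | some ret => acc ++ [String.mk (rstripRB ret)]
      | none => acc
    else acc) []

-- ===== PORT B =====
-- next_close built right-to-left: entry for position k is the least index ≥ k holding '}',
-- none if there is no such index; the list covers positions k .. k+len (last entry none).
def nextCloseList : List Char → Nat → List (Option Nat)
  | [], _ => [none]
  | c :: t, k =>
    let rest := nextCloseList t (k + 1)
    (if c = '}' then some k else rest.headD none) :: rest

def get_parts_alt (string : String) : List String :=
  let l := string.toList
  let nc := nextCloseList l 0
  l.zipIdx.foldl (fun acc ci =>
    if ci.1 = '{' then
      match nc.getD (ci.2 + 1) none with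
      | some j => acc ++ [String.mk ((l.drop (ci.2 + 1)).take (j - (ci.2 + 1)))]
      | none => acc
    else acc) []

-- ===== PRECONDITION & SPEC =====
-- Pre_ excludes exactly the strings on which A raises IndexError: those with a '{'
-- having no '}' anywhere after it.
def Pre_get_parts (string : String) : Prop :=
  ∀ i < string.toList.length, string.toList[i]! = '{' → '}' ∈ string.toList.drop (i + 1)
instance (string : String) : Decidable (Pre_get_parts string) := by
  unfold Pre_get_parts; infer_instance

def pvWitness_get_parts : String := "{a} {b}"

def Spec_get_parts (string : String) (out : List String) : Prop := out = get_parts_alt string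
instance (string : String) (out : List String) : Decidable (Spec_get_parts string out) := by
  unfold Spec_get_parts; infer_instance

-- ===== CLAIM (what is proved, stated in full; the proofs are below) =====
def Claim_equal_get_parts : Prop :=
  ∀ (string : String), Dom_get_parts string → Pre_get_parts string →
    Spec_get_parts string (get_parts string)

-- ===== LEMMAS AND PROOFS =====

lemma scanA_spec (s ret : List Char) :
    scanA s ret
      = (s.findIdx? (· = '}')).map (fun _ => ret ++ s.takeWhile (· ≠ '}') ++ ['}']) := by
  induction s generalizing ret with
  | nil => rfl
  | cons c t ih =>
    by_cases h : c = '}'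
    · simp [scanA, h, List.findIdx?_cons, List.takeWhile]
    · simp only [scanA, if_neg h, List.findIdx?_cons, decide_eq_true_eq, if_neg h, ih,
        List.takeWhile]
      simp [h, Option.map_map]
      cases t.findIdx? (· = '}') <;> simp

lemma dropWhile_no (p : Char → Bool) (l : List Char) (h : ∀ x ∈ l, ¬ p x = true) :
    l.dropWhile p = l := by
  cases l with
  | nil => rfl
  | cons c t =>
    have := h c (by simp)
    simp [List.dropWhile, this]

lemma rstripRB_append (xs : List Char) (h : ∀ x ∈ xs, x ≠ '}') :
    rstripRB (xs ++ ['}']) = xs := by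
  have h' : ∀ x ∈ xs.reverse, ¬ (decide (x = '}')) = true := by
    intro x hx
    simp only [List.mem_reverse] at hx
    simpa using h x hx
  unfold rstripRB
  rw [List.reverse_append]
  simp only [List.reverse_cons, List.reverse_nil, List.nil_append, List.cons_append,
    List.dropWhile_cons, decide_true, if_true]
  rw [dropWhile_no _ _ h', List.reverse_reverse]

lemma nextCloseList_getD (l : List Char) (k m : Nat) :
    (nextCloseList l k).getD m none
      = ((l.drop m).findIdx? (· = '}')).map (· + (m + k)) := by
  induction l generalizing k m with
  | nil => cases m <;> simp [nextCloseList, List.getD]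
  | cons c t ih =>
    cases m with
    | zero =>
      by_cases h : c = '}'
      · simp [nextCloseList, h, List.getD, List.findIdx?_cons]
      · have hd : (nextCloseList t (k + 1)).headD none = (nextCloseList t (k + 1)).getD 0 none := by
          cases htt : nextCloseList t (k + 1) with
          | nil => simp [List.getD]
          | cons a b => simp [List.getD]
        simp only [nextCloseList, List.getD, List.getElem?_cons_zero, Option.getD_some, if_neg h]
        rw [hd, ih (k + 1) 0]
        simp [List.findIdx?_cons, h, Option.map_map]
        cases t.findIdx? (· = '}') <;> simp <;> omega
    | succ m' =>
      simp only [nextCloseList, List.getD, List.getElem?_cons_succ, List.drop_succ_cons]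
      have := ih (k + 1) m'
      simp only [List.getD] at this
      rw [this]
      cases (t.drop m').findIdx? (· = '}') <;> simp <;> omega

lemma take_findIdx (s : List Char) (r : Nat)
    (h : s.findIdx? (· = '}') = some r) :
    s.take r = s.takeWhile (· ≠ '}') := by
  induction s generalizing r with
  | nil => simp at h
  | cons c t ih =>
    by_cases hc : c = '}'
    · simp [List.findIdx?_cons, hc] at h
      simp [← h, List.takeWhile, hc]
    · simp [List.findIdx?_cons, hc] at h
      obtain ⟨r', hr', rfl⟩ := h
      simp [List.take, List.takeWhile, hc, ih r' hr']

lemma branch_eq (l : List Char) (i : Nat) (acc : List String) :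
    (match scanA (l.drop (i + 1)) [] with
      | some ret => acc ++ [String.mk (rstripRB ret)]
      | none => acc)
    = (match (nextCloseList l 0).getD (i + 1) none with
      | some j => acc ++ [String.mk ((l.drop (i + 1)).take (j - (i + 1)))]
      | none => acc) := by
  rw [scanA_spec, nextCloseList_getD]
  cases h : (l.drop (i + 1)).findIdx? (· = '}') with
  | none => simp
  | some r =>
    simp only [Option.map_some]
    have ht : (l.drop (i + 1)).take (r + (i + 1 + 0) - (i + 1))
        = (l.drop (i + 1)).takeWhile (· ≠ '}') := by
      have : r + (i + 1 + 0) - (i + 1) = r := by omega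
      rw [this]
      exact take_findIdx _ _ h
    have hr : rstripRB ([] ++ (l.drop (i + 1)).takeWhile (· ≠ '}') ++ ['}'])
        = (l.drop (i + 1)).takeWhile (· ≠ '}') := by
      simp only [List.nil_append]
      apply rstripRB_append
      intro x hx
      have := List.mem_takeWhile_imp hx
      simpa using this
    rw [ht, hr]

theorem get_parts_eq_alt (s : String) : get_parts s = get_parts_alt s := by
  unfold get_parts get_parts_alt
  congr 1
  funext acc ci
  by_cases h : ci.1 = '{'
  · simp only [if_pos h]
    exact branch_eq s.toList ci.2 acc
  · simp [h]

-- ===== VERDICT (by name: the statement is the Claim_ definition above) =====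
theorem get_parts_spec : Claim_equal_get_parts := by
  intro s _ _
  unfold Spec_get_parts
  exact get_parts_eq_alt s
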